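-- pv_equiv track=rewrite | github.com/v-song/airbnb-vis | visualizer.py | num_listings
-- ===== SOURCE A (Python) =====
-- def num_listings(d):
--     """
--     This function takes d, a parameter that's a dictionary consisting of keys that are host ids and values that are lists
--     of room ids. The function returns a list consisting of the number of hosts with i amount of listings.
--
--     :param d: a dictionary of keys that are host ids (int) and values that are lists of room ids (int), (dict)
--     :return: a list where where l[i] is the number of hosts with i listings (list)
--     """
--     num_list = []
--     frequency_list = []
--     max_listing = 0
--     list_d = list(d)
--     count = 0
--
--     # compares the number of values/listings associated with host ids to identify the greatest number of listings for any one host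
--     for i in range(len(d)):
--         if (len(d[list_d[i]]) > max_listing):
--             max_listing = len(d[list_d[i]])
--
--     # counts how many hosts have listings that are equal to i
--     for i in range(max_listing+1):
--         for host in d.keys():
--             # if the number of listings a host has is equal to i, adds one to the count
--             if len(d[host]) == i:
--                 count += 1
--         # appends the frequency of hosts with i number of listings to a list
--         num_list.append(count)
--         # resets the count to zero
--         count = 0
--     # returns a list with the number of hosts with exactly i listings
--     return num_list
-- ===== SOURCE B (Python) =====
-- def num_listings(d):
--     """Single-pass histogram: collect each host's listing count, then bump
--     res[c] for every count c in an array of zeros sized max(counts)+1."""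
--     counts = [len(v) for v in d.values()]
--     if not counts:
--         return [0]
--     res = [0] * (max(counts) + 1)
--     for c in counts:
--         res[c] += 1
--     return res
-- ===== Notes on version B (the rewrite author's own statement) =====
-- stated objective: faster
-- what changed: A scans every host once per candidate count (for each i in 0..max it recounts all hosts with exactly i listings); B makes one pass collecting each host's listing count and bumps res[c] in a zero array of length max+1.
import Mathlib
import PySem

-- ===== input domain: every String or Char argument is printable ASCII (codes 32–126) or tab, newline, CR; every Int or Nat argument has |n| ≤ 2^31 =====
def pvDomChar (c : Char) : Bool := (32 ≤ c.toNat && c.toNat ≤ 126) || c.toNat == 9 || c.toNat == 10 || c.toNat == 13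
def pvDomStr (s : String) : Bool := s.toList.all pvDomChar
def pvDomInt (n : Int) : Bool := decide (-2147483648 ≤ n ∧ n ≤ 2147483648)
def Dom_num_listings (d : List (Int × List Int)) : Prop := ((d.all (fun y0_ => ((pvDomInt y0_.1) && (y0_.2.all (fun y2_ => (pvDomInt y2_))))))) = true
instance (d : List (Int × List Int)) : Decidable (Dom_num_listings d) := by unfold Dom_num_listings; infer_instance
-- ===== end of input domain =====

-- B replaces A's rescan of all hosts for every possible listing count (O(n·max)) by one
-- pass that bumps res[c] in a zero array of length max+1 (O(n+max)).

-- ===== PORT A =====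
-- len(d[k]) as an Int (lookup in the dict d, then len)
def pvLen (d : List (Int × List Int)) (k : Int) : Int :=
  (((PySem.Dict.mk d).getD k []).length : Int)

def num_listings (d : List (Int × List Int)) : List Int :=
  let list_d := (PySem.Dict.mk d).keys
  let max_listing :=
    (PySem.List.pyRange 0 (PySem.List.len list_d)).foldl
      (fun m i =>
        if pvLen d (PySem.List.pyGetD list_d i 0) > m
        then pvLen d (PySem.List.pyGetD list_d i 0) else m) 0
  (PySem.List.pyRange 0 (max_listing + 1)).foldl
    (fun num_list i =>
      num_list ++
        [ list_d.foldl (fun count host => if pvLen d host == i then count + 1 else count) 0 ])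
    []

-- ===== PORT B =====
def num_listings_alt (d : List (Int × List Int)) : List Int :=
  let counts := (PySem.Dict.mk d).values.map (fun v => (v.length : Int))
  if counts.isEmpty then [0]
  else
    -- max(counts): counts is nonempty here, so max? is some and the default is never used
    let res := List.replicate ((PySem.List.max? counts (fun x => x)).getD 0 + 1).toNat (0 : Int)
    -- res[c] += 1 : every c is a list length, hence 0 ≤ c and c.toNat is Python's index
    counts.foldl (fun res c => res.set c.toNat (PySem.List.pyGetD res c 0 + 1)) res

-- ===== PRECONDITION & SPEC =====
-- d stands for a Python dict, whose keys are necessarily distinct: an association list with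
-- duplicate keys encodes no dict input of A, so Pre_ requires the keys to be pairwise distinct.
def Pre_num_listings (d : List (Int × List Int)) : Prop := (d.map Prod.fst).Nodup
instance (d : List (Int × List Int)) : Decidable (Pre_num_listings d) := by
  unfold Pre_num_listings; infer_instance

def pvWitness_num_listings : (List (Int × List Int)) := [(1, [7]), (2, []), (3, [4, 5])]

def Spec_num_listings (d : List (Int × List Int)) (out : List Int) : Prop := out = num_listings_alt d
instance (d : List (Int × List Int)) (out : List Int) : Decidable (Spec_num_listings d out) := by
  unfold Spec_num_listings; infer_instance

-- ===== CLAIM (what is proved, stated in full; the proofs are below) =====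
def Claim_equal_num_listings : Prop :=
  ∀ (d : List (Int × List Int)), Dom_num_listings d → Pre_num_listings d →
    Spec_num_listings d (num_listings d)

-- ===== LEMMAS AND PROOFS =====

-- the listing counts of d, in order
def pvLens (d : List (Int × List Int)) : List Int := d.map (fun p => ((p.2.length : Nat) : Int))

lemma pvLens_nonneg (d : List (Int × List Int)) : ∀ c ∈ pvLens d, 0 ≤ c := by
  intro c hc
  simp only [pvLens, List.mem_map] at hc
  obtain ⟨p, _, rfl⟩ := hc
  positivity

lemma pvLen_of_mem (d : List (Int × List Int)) (h : (d.map Prod.fst).Nodup) :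
    ∀ p ∈ d, pvLen d p.1 = ((p.2.length : Nat) : Int) := by
  intro p hp
  have hk : (PySem.Dict.mk d).keys.Nodup := by simpa [PySem.Dict.keys] using h
  have : (PySem.Dict.mk d).getD p.1 [] = p.2 :=
    PySem.Dict.getD_of_mem_items (PySem.Dict.mk d) (by simpa using hp) hk []
  simp [pvLen, this]

lemma numA_eq (d : List (Int × List Int)) (h : (d.map Prod.fst).Nodup) :
    num_listings d =
      (PySem.List.pyRange 0 ((pvLens d).foldl max 0 + 1)).map
        (fun i => (((pvLens d).count i : Nat) : Int)) := by
  have hkeys : (PySem.Dict.mk d).keys = d.map Prod.fst := rfl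
  simp only [num_listings]
  rw [PySem.List.foldl_pyRange_pyGetD ((PySem.Dict.mk d).keys) 0
        (fun m k => if pvLen d k > m then pvLen d k else m) 0 le_rfl]
  simp only [Int.toNat_zero, List.drop_zero]
  rw [hkeys, List.foldl_map]
  rw [PySem.List.foldl_congr_mem _ _ (fun m p => max m ((p.2.length : Nat) : Int)) _
        (by intro acc x hx; rw [pvLen_of_mem d h x hx]; simp only [max_def]
            split_ifs <;> omega)]
  rw [show (List.foldl (fun m p => max m ((p.2.length : Nat) : Int)) 0 d)
        = (pvLens d).foldl max 0 by rw [pvLens, List.foldl_map]]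
  rw [PySem.List.foldl_append_singleton_eq_map
        (fun i => List.foldl (fun count host => if pvLen d host == i then count + 1 else count) 0
                    (d.map Prod.fst))]
  rw [List.nil_append]
  apply List.map_congr_left
  intro i _
  rw [List.foldl_map]
  rw [PySem.List.foldl_congr_mem _ _
        (fun c p => if (((p.2.length : Nat) : Int) == i) then c + 1 else c) _
        (by intro acc x hx; rw [pvLen_of_mem d h x hx])]
  simpa [pvLens, List.foldl_map] using PySem.List.foldl_beq_add_one (pvLens d) i (0 : Int)

lemma hist_length (L r : List Int) :
    (L.foldl (fun r c => r.set c.toNat (PySem.List.pyGetD r c 0 + 1)) r).length = r.length := by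
  induction L generalizing r with
  | nil => rfl
  | cons c L ih => simpa [List.foldl_cons] using ih (r.set c.toNat (PySem.List.pyGetD r c 0 + 1))

lemma hist_get (L r : List Int) (h : ∀ c ∈ L, 0 ≤ c ∧ c.toNat < r.length)
    (j : Nat) (hj : j < r.length) :
    (L.foldl (fun r c => r.set c.toNat (PySem.List.pyGetD r c 0 + 1)) r).getD j 0 =
      r.getD j 0 + ((L.count (j : Int) : Nat) : Int) := by
  induction L generalizing r with
  | nil => simp
  | cons c L ih =>
    obtain ⟨hc0, hclt⟩ := h c (by simp)
    have hcI : c < (r.length : Int) := by omega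
    have hget : PySem.List.pyGetD r c 0 = r[c.toNat] :=
      PySem.List.pyGetD_eq_getElem r 0 hc0 hcI
    set r' := r.set c.toNat (PySem.List.pyGetD r c 0 + 1) with hr'
    have hlen' : r'.length = r.length := by simp [hr']
    have ih' := ih r' (by
      intro x hx
      exact ⟨(h x (by simp [hx])).1, by rw [hlen']; exact (h x (by simp [hx])).2⟩)
      (by rw [hlen']; exact hj)
    rw [List.foldl_cons, ih']
    have hjr' : j < r'.length := by rw [hlen']; exact hj
    rw [List.getD_eq_getElem r' 0 hjr', List.getD_eq_getElem r 0 hj]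
    by_cases hcj : c.toNat = j
    · have hcjI : c = (j : Int) := by omega
      have hset : r'[j]'hjr' = r[j] + 1 := by
        simp [hr', hget, hcj]
      rw [hset, hcjI, List.count_cons_self]
      push_cast
      ring
    · have hcjI : c ≠ (j : Int) := by omega
      have hset : r'[j]'hjr' = r[j] := by
        simp [hr', hcj]
      rw [hset, List.count_cons_of_ne (by simpa using hcjI)]

lemma numB_eq (d : List (Int × List Int)) :
    num_listings_alt d =
      (PySem.List.pyRange 0 ((pvLens d).foldl max 0 + 1)).map
        (fun i => (((pvLens d).count i : Nat) : Int)) := by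
  have hvals : (PySem.Dict.mk d).values.map (fun v => (v.length : Int)) = pvLens d := by
    rw [show (PySem.Dict.mk d).values = d.map Prod.snd from rfl, List.map_map]; rfl
  cases d with
  | nil => rfl
  | cons p rest =>
    simp only [num_listings_alt]
    rw [hvals]
    have hnn := pvLens_nonneg (p :: rest)
    set M := (pvLens (p :: rest)).foldl max 0 with hM
    have hM0 : 0 ≤ M := (PySem.List.le_foldl_max (pvLens (p :: rest)) 0).1
    have hMmax : ∀ y ∈ pvLens (p :: rest), y ≤ M :=
      (PySem.List.le_foldl_max (pvLens (p :: rest)) 0).2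
    have hpv : pvLens (p :: rest) = ((p.2.length : Nat) : Int) :: pvLens rest := rfl
    have hx0 : (0 : Int) ≤ ((p.2.length : Nat) : Int) := by positivity
    have hmax' : (PySem.List.max? (pvLens (p :: rest)) (fun x => x)).getD 0 = M := by
      rw [hpv, PySem.List.max?_id_cons, Option.getD_some, hM, hpv, List.foldl_cons,
        max_eq_right hx0]
    rw [show (pvLens (p :: rest)).isEmpty = false from rfl]
    simp only [Bool.false_eq_true, if_false]
    rw [hmax']
    have h1 : (M + 1).toNat = M.toNat + 1 := by omega
    have h2 : M + 1 = ((M.toNat + 1 : Nat) : Int) := by omega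
    rw [h1, h2, PySem.List.pyRange_zero_natCast, List.map_map]
    have hcond : ∀ c ∈ pvLens (p :: rest), 0 ≤ c ∧
        c.toNat < (List.replicate (M.toNat + 1) (0 : Int)).length := by
      intro c hc
      have := hMmax c hc
      have := hnn c hc
      simp only [List.length_replicate]
      omega
    apply List.ext_getElem
    · rw [hist_length]
      simp
    · intro j hj1 hj2
      have hjlen : j < (List.replicate (M.toNat + 1) (0 : Int)).length := by
        rw [hist_length] at hj1; exact hj1
      rw [← List.getD_eq_getElem _ 0 hj1, hist_get (pvLens (p :: rest)) _ hcond j hjlen,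
        List.getD_eq_getElem _ 0 hjlen, List.getElem_replicate, zero_add]
      simp [List.getElem_map, List.getElem_range]

-- ===== VERDICT (by name: the statement is the Claim_ definition above) =====
theorem num_listings_spec : Claim_equal_num_listings := by
  intro d _ hpre
  unfold Spec_num_listings
  rw [numA_eq d hpre, numB_eq d]
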